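-- pv_equiv track=rewrite | github.com/Arya-A-Nair/Finnix | flask/getGraphByTransaction.py | getGraphByTransactions
-- ===== SOURCE A (Python) =====
-- import queue
--
-- def getGraphByTransactions(transactions, transaction):
--     adj = dict()
--
--     for tempTransaction in transactions:
--         if tempTransaction["senderAccount"] != transaction["senderAccount"]:
--             arr = adj.get(tempTransaction["senderAccount"], [])
--             arr.append(tempTransaction)
--             adj[tempTransaction["senderAccount"]] = arr
--
--     edges = [transaction]
--     visited = [transaction["senderAccount"]]
--
--     q = queue.Queue()
--     q.put(transaction["receiverAccount"])
--
--     while not q.empty():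
--         front = q.get()
--
--         if front in visited:
--             continue
--         else:
--             visited.append(front)
--
--         arr = adj.get(front, [])
--
--         for trans in arr:
--             if trans["date"] > transaction["date"]:
--                 edges.append(trans)
--                 q.put(trans["senderAccount"])
--
--     return edges
-- ===== SOURCE B (Python) =====
-- def getGraphByTransactions(transactions, transaction):
--     # The BFS in the original explores exactly one hop: every re-enqueued node
--     # equals the already-visited front, so a single ordered pass suffices.
--     edges = [transaction]
--     if transaction["receiverAccount"] != transaction["senderAccount"]:
--         edges += [t for t in transactions
--                   if t["senderAccount"] == transaction["receiverAccount"]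
--                   and t["date"] > transaction["date"]]
--     return edges
-- ===== Notes on version B (the rewrite author's own statement) =====
-- stated objective: simpler
-- what changed: The adjacency-dict/queue/visited BFS of A only ever explores one hop (every node it re-enqueues is the already-visited front), so B replaces the whole graph machinery with a single ordered filtering pass over the transactions list, guarded by receiver != sender.
import Mathlib
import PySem

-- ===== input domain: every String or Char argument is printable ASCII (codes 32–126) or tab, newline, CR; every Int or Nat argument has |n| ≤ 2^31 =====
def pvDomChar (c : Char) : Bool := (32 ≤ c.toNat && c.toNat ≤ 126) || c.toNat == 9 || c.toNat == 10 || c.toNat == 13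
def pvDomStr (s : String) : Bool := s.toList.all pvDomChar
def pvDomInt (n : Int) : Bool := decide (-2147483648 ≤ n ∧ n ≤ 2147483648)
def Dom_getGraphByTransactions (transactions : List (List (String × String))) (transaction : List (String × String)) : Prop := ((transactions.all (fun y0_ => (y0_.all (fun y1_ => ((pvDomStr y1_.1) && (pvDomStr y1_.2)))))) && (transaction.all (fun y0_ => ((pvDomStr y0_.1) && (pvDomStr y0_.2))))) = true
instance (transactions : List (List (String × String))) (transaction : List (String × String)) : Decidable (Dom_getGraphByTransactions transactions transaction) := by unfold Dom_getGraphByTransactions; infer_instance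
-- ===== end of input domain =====

-- B drops A's adjacency-dict/queue/visited BFS (which explores exactly one hop) for a
-- single ordered filtering pass over the input list; same return value on all of Pre_.

-- ===== PORT A =====

-- row["k"]: first-match lookup in the association list (the Python dict); total form,
-- used only under Pre_, which guarantees the key is present wherever A reads one.
def rowGet (row : List (String × String)) (k : String) : String :=
  ((PySem.Dict.mk row).get? k).getD ""

def rowHas (row : List (String × String)) (k : String) : Prop :=
  ((PySem.Dict.mk row).get? k).isSome = true

-- the adjacency-building loop of A
def buildAdj (transactions : List (List (String × String))) (sender : String) :
    PySem.Dict String (List (List (String × String))) :=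
  transactions.foldl
    (fun adj t =>
      if rowGet t "senderAccount" ≠ sender then
        adj.insert (rowGet t "senderAccount") (adj.getD (rowGet t "senderAccount") [] ++ [t])
      else adj)
    PySem.Dict.empty

-- A's inner 'for trans in arr' loop: extends (edges, pending queue pushes)
def innerLoop (txn : List (String × String))
    (arr : List (List (String × String)))
    (st : List (List (String × String)) × List String) :
    List (List (String × String)) × List String :=
  arr.foldl
    (fun st trans =>
      if rowGet txn "date" < rowGet trans "date" then
        (st.1 ++ [trans], st.2 ++ [rowGet trans "senderAccount"])
      else st)
    st

-- A's while-loop over the queue; fuel only makes the recursion structural (one unit per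
-- iteration; transactions.length + 1 units always suffice, as proved below).
def bfsLoop (adj : PySem.Dict String (List (List (String × String))))
    (txn : List (String × String)) (fuel : Nat) (q visited : List String)
    (edges : List (List (String × String))) : List (List (String × String)) :=
  match fuel, q with
  | _, [] => edges
  | 0, _ :: _ => edges
  | Nat.succ f, front :: q' =>
    if front ∈ visited then
      bfsLoop adj txn f q' visited edges
    else
      let st := innerLoop txn (adj.getD front []) (edges, [])
      bfsLoop adj txn f (q' ++ st.2) (visited ++ [front]) st.1

def getGraphByTransactions (transactions : List (List (String × String))) (transaction : List (String × String)) : List (List (String × String)) :=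
  let adj := buildAdj transactions (rowGet transaction "senderAccount")
  bfsLoop adj transaction (transactions.length + 1)
    [rowGet transaction "receiverAccount"]
    [rowGet transaction "senderAccount"]
    [transaction]

-- ===== PORT B =====
def getGraphByTransactions_alt (transactions : List (List (String × String))) (transaction : List (String × String)) : List (List (String × String)) :=
  if rowGet transaction "receiverAccount" ≠ rowGet transaction "senderAccount" then
    transaction ::
      transactions.filter (fun t =>
        rowGet t "senderAccount" == rowGet transaction "receiverAccount" &&
        decide (rowGet transaction "date" < rowGet t "date"))
  else
    [transaction]

-- ===== PRECONDITION & SPEC =====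
-- Pre_ excludes exactly the inputs on which the Python A raises KeyError: a required key
-- missing from a dict at a point where A reads it ("senderAccount"/"receiverAccount" of
-- transaction, "senderAccount" of every row, and "date" of transaction and of a row
-- exactly when that row's sender matches the receiver actually explored).
def Pre_getGraphByTransactions (transactions : List (List (String × String))) (transaction : List (String × String)) : Prop :=
  rowHas transaction "senderAccount" ∧ rowHas transaction "receiverAccount" ∧
  (∀ t ∈ transactions, rowHas t "senderAccount") ∧
  (rowGet transaction "receiverAccount" ≠ rowGet transaction "senderAccount" →
    ∀ t ∈ transactions,
      rowGet t "senderAccount" = rowGet transaction "receiverAccount" →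
      rowHas t "date" ∧ rowHas transaction "date")
instance (transactions : List (List (String × String))) (transaction : List (String × String)) : Decidable (Pre_getGraphByTransactions transactions transaction) := by
  unfold Pre_getGraphByTransactions rowHas; infer_instance

def pvWitness_getGraphByTransactions : (List (List (String × String))) × (List (String × String)) :=
  ([[("senderAccount", "b"), ("receiverAccount", "c"), ("date", "2")]],
   [("senderAccount", "a"), ("receiverAccount", "b"), ("date", "1")])

def Spec_getGraphByTransactions (transactions : List (List (String × String))) (transaction : List (String × String)) (out : List (List (String × String))) : Prop := out = getGraphByTransactions_alt transactions transaction
instance (transactions : List (List (String × String))) (transaction : List (String × String)) (out : List (List (String × String))) : Decidable (Spec_getGraphByTransactions transactions transaction out) := by unfold Spec_getGraphByTransactions; infer_instance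

-- ===== CLAIM (what is proved, stated in full; the proofs are below) =====
def Claim_equal_getGraphByTransactions : Prop := ∀ (transactions : List (List (String × String))) (transaction : List (String × String)), Dom_getGraphByTransactions transactions transaction → Pre_getGraphByTransactions transactions transaction → Spec_getGraphByTransactions transactions transaction (getGraphByTransactions transactions transaction)

-- ===== LEMMAS AND PROOFS =====

-- The adjacency dict built by A, read at any key k other than the excluded sender,
-- holds exactly the rows whose "senderAccount" is k, in input order.
theorem buildAdj_getD (transactions : List (List (String × String))) (sender k : String)
    (hk : k ≠ sender) (d : PySem.Dict String (List (List (String × String)))) :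
    (transactions.foldl
      (fun adj t =>
        if rowGet t "senderAccount" ≠ sender then
          adj.insert (rowGet t "senderAccount") (adj.getD (rowGet t "senderAccount") [] ++ [t])
        else adj) d).getD k []
    = d.getD k [] ++ transactions.filter (fun t => rowGet t "senderAccount" == k) := by
  induction transactions generalizing d with
  | nil => simp
  | cons t ts ih =>
    simp only [List.foldl_cons, List.filter_cons]
    by_cases hs : rowGet t "senderAccount" = sender
    · have hne : (rowGet t "senderAccount" == k) = false := by
        simp only [beq_eq_false_iff_ne, ne_eq]
        exact fun h => hk (hs ▸ h ▸ rfl)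
      rw [if_neg (not_not_intro hs), ih d, hne]
      simp
    · rw [if_pos hs]
      by_cases hek : rowGet t "senderAccount" = k
      · have hbt : (rowGet t "senderAccount" == k) = true := by simp [hek]
        rw [ih _, hbt]
        simp [PySem.Dict.getD, PySem.Dict.get?_insert_self, hek]
      · have hbf : (rowGet t "senderAccount" == k) = false := by simp [hek]
        rw [ih _, hbf]
        simp [PySem.Dict.getD, PySem.Dict.get?_insert_of_ne _ _ (fun h => hek h.symm)]

-- the inner for-loop appends the date-filtered rows to edges and their senders to the queue
theorem innerLoop_eq (txn : List (String × String)) (arr : List (List (String × String)))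
    (edges : List (List (String × String))) (ps : List String) :
    innerLoop txn arr (edges, ps) =
      (edges ++ arr.filter (fun t => decide (rowGet txn "date" < rowGet t "date")),
       ps ++ (arr.filter (fun t => decide (rowGet txn "date" < rowGet t "date"))).map
               (fun t => rowGet t "senderAccount")) := by
  induction arr generalizing edges ps with
  | nil => simp [innerLoop]
  | cons t ts ih =>
    simp only [innerLoop, List.foldl_cons, List.filter_cons] at ih ⊢
    by_cases h : rowGet txn "date" < rowGet t "date"
    · rw [if_pos h, ih (edges ++ [t]) (ps ++ [rowGet t "senderAccount"]),
         if_pos (decide_eq_true h)]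
      simp
    · rw [if_neg h, ih edges ps, if_neg (by simp [h])]

-- a queue all of whose entries are already visited is drained without effect
theorem bfsLoop_all_visited (adj : PySem.Dict String (List (List (String × String))))
    (txn : List (String × String)) (fuel : Nat) (q visited : List String)
    (edges : List (List (String × String)))
    (hq : ∀ x ∈ q, x ∈ visited) (hf : q.length ≤ fuel) :
    bfsLoop adj txn fuel q visited edges = edges := by
  induction q generalizing fuel with
  | nil => cases fuel <;> simp [bfsLoop]
  | cons x q' ih =>
    cases fuel with
    | zero => simp at hf
    | succ f =>
      have hx : x ∈ visited := hq x (by simp)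
      simp only [bfsLoop, if_pos hx]
      exact ih f (fun y hy => hq y (List.mem_cons_of_mem x hy))
        (by simp only [List.length_cons] at hf; omega)

-- ===== VERDICT (by name: the statement is the Claim_ definition above) =====
theorem getGraphByTransactions_spec : Claim_equal_getGraphByTransactions := by
  intro transactions transaction _ _
  unfold Spec_getGraphByTransactions getGraphByTransactions getGraphByTransactions_alt
  set s := rowGet transaction "senderAccount" with hs
  set r := rowGet transaction "receiverAccount" with hr
  by_cases hrs : r = s
  · -- receiver already visited: the BFS drains immediately
    simp only [hrs, ne_eq, not_true_eq_false, if_false]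
    exact bfsLoop_all_visited _ _ _ _ _ _ (by simp) (by simp)
  · rw [if_pos hrs]
    -- one real BFS step: front = r, not visited
    have hfront : r ∉ ([s] : List String) := by simpa using hrs
    simp only [bfsLoop, if_neg hfront]
    have hadj : (buildAdj transactions s).getD r []
        = transactions.filter (fun t => rowGet t "senderAccount" == r) := by
      unfold buildAdj
      rw [buildAdj_getD transactions s r hrs PySem.Dict.empty]
      simp [PySem.Dict.getD, PySem.Dict.empty, PySem.Dict.get?]
    rw [hadj, innerLoop_eq]
    simp only [List.nil_append]
    have hdrain := bfsLoop_all_visited (buildAdj transactions s) transaction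
      (transactions.length)
      (((transactions.filter (fun t => rowGet t "senderAccount" == r)).filter
          (fun t => decide (rowGet transaction "date" < rowGet t "date"))).map
          (fun t => rowGet t "senderAccount"))
      ([s] ++ [r])
      ([transaction] ++
        (transactions.filter (fun t => rowGet t "senderAccount" == r)).filter
          (fun t => decide (rowGet transaction "date" < rowGet t "date")))
      (by
        intro x hx
        simp only [List.mem_map, List.mem_filter] at hx
        obtain ⟨t, ⟨⟨_, ht⟩, _⟩, hxeq⟩ := hx
        have : x = r := by rw [← hxeq]; exact eq_of_beq ht
        simp [this])
      (by
        have h1 := List.length_filter_le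
          (fun t => decide (rowGet transaction "date" < rowGet t "date"))
          (transactions.filter (fun t => rowGet t "senderAccount" == r))
        have h2 := List.length_filter_le (fun t => rowGet t "senderAccount" == r) transactions
        simp only [List.length_map]
        omega)
    rw [hdrain, List.filter_filter, List.singleton_append]
    exact congrArg _ (List.filter_congr fun t _ => Bool.and_comm _ _)
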